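-- pv_equiv track=rewrite | github.com/d-krupke/cpsat-primer | build.py | replace_info_boxes
-- ===== SOURCE A (Python) =====
-- def _create_info_box(msg):
--     return f"""
-- <table style="width: 100%; border: 2px solid #ccc; border-radius: 8px; box-shadow: 0 2px 4px rgba(0, 0, 0, 0.1);">
-- <tr>
-- <td style="padding: 10px;">
-- <div style="display: flex; justify-content: space-between; align-items: center;">
--                 <div style="width: 10%;">
--                     <img src="https://raw.githubusercontent.com/d-krupke/cpsat-primer/main/images/info_platypus.webp" alt="Description of image" style="width: 100%;">
--                 </div>
--                 <div style="width: 90%;">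
--
-- {msg}
--
--   </div>
-- </div>
--     </td>
--   </tr>
-- </table>
--     """
--
-- def replace_info_boxes(content):
--     """
--     An info box starts with `> [!NOTE]` and ends with a line that does not start with `>`.
--     """
--     lines = content.split("\n")
--     new_content = ""
--     collect_info = False
--     info_msg = ""
--     for line in lines:
--         if line.startswith("> [!NOTE]"):
--             collect_info = True
--             info_msg += line[len("> [!NOTE]") :] + "\n"
--         elif collect_info:
--             if line == ">":
--                 continue
--             if line.startswith("> "):
--                 info_msg += line[len("> ") :] + "\n"
--
--             else:
--                 new_content += _create_info_box(info_msg)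
--                 new_content += "\n"
--                 collect_info = False
--                 info_msg = ""
--                 new_content += line + "\n"
--         else:
--             new_content += line + "\n"
--     return new_content
-- ===== SOURCE B (Python) =====
-- def _create_info_box(msg):
--     return f"""
-- <table style="width: 100%; border: 2px solid #ccc; border-radius: 8px; box-shadow: 0 2px 4px rgba(0, 0, 0, 0.1);">
-- <tr>
-- <td style="padding: 10px;">
-- <div style="display: flex; justify-content: space-between; align-items: center;">
--                 <div style="width: 10%;">
--                     <img src="https://raw.githubusercontent.com/d-krupke/cpsat-primer/main/images/info_platypus.webp" alt="Description of image" style="width: 100%;">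
--                 </div>
--                 <div style="width: 90%;">
--
-- {msg}
--
--   </div>
-- </div>
--     </td>
--   </tr>
-- </table>
--     """
--
--
-- def replace_info_boxes(content):
--     """Index-driven scan: find each `> [!NOTE]` block with an inner loop, emit the box
--     when the block is closed by a non-quote line (a block running to end of input emits nothing)."""
--     lines = content.split("\n")
--     out = []
--     i = 0
--     n = len(lines)
--     while i < n:
--         line = lines[i]
--         if not line.startswith("> [!NOTE]"):
--             out.append(line + "\n")
--             i += 1
--             continue
--         msg = line[9:] + "\n"
--         i += 1
--         while i < n:
--             cur = lines[i]
--             if cur == ">":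
--                 i += 1
--             elif cur.startswith("> [!NOTE]"):
--                 msg += cur[9:] + "\n"
--                 i += 1
--             elif cur.startswith("> "):
--                 msg += cur[2:] + "\n"
--                 i += 1
--             else:
--                 break
--         if i < n:
--             out.append(_create_info_box(msg) + "\n")
--             out.append(lines[i] + "\n")
--             i += 1
--     return "".join(out)
-- ===== Notes on version B (the rewrite author's own statement) =====
-- stated objective: alternative
-- what changed: Replaced the flag-based state machine (collect_info/info_msg carried through one for-loop) with an index-driven scan: an inner while-loop collects each NOTE block and emits the box only when a closing line is found before end of input.
import Mathlib
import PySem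

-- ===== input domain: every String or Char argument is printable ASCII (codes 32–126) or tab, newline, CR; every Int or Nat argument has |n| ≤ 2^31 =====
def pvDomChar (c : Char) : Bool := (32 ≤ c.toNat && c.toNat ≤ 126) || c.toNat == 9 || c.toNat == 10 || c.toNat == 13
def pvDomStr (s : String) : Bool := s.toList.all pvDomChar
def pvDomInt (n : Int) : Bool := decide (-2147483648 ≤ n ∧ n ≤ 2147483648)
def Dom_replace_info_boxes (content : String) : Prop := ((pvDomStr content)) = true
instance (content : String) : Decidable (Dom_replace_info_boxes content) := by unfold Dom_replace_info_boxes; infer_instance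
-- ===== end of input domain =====

-- B replaces A's flag-based state machine by an index-driven scan with an inner loop per NOTE block (objective: alternative decomposition, same cost).

-- shared helpers: the literal pieces of _create_info_box and the two markers
def ibPre : List Char := "\n<table style=\"width: 100%; border: 2px solid #ccc; border-radius: 8px; box-shadow: 0 2px 4px rgba(0, 0, 0, 0.1);\">\n<tr>\n<td style=\"padding: 10px;\">\n<div style=\"display: flex; justify-content: space-between; align-items: center;\">\n                <div style=\"width: 10%;\">\n                    <img src=\"https://raw.githubusercontent.com/d-krupke/cpsat-primer/main/images/info_platypus.webp\" alt=\"Description of image\" style=\"width: 100%;\">\n                </div>\n                <div style=\"width: 90%;\">\n\n".toList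
def ibPost : List Char := "\n\n  </div>\n</div>\n    </td>\n  </tr>\n</table>\n    ".toList
def createInfoBox (msg : List Char) : List Char := ibPre ++ msg ++ ibPost
def notePrefix : List Char := "> [!NOTE]".toList
def quotePrefix : List Char := "> ".toList

-- ===== PORT A ===== (fold over the lines with state (new_content, collect_info, info_msg))
def aStep : (List Char × Bool × List Char) → List Char → (List Char × Bool × List Char)
  | (acc, collect, msg), line =>
    if PySem.Chars.startswith line notePrefix then (acc, true, msg ++ line.drop 9 ++ ['\n'])
    else if collect then
      if line = ['>'] then (acc, collect, msg)
      else if PySem.Chars.startswith line quotePrefix then (acc, collect, msg ++ line.drop 2 ++ ['\n'])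
      else (acc ++ createInfoBox msg ++ ['\n'] ++ line ++ ['\n'], false, [])
    else (acc ++ line ++ ['\n'], collect, msg)

def replace_info_boxes (content : String) : String :=
  String.ofList ((PySem.Chars.splitOn content.toList "\n".toList).foldl aStep ([], false, [])).1

-- ===== PORT B ===== (index-driven scan: outer loop over lines, inner loop collecting one block)
mutual
def bOuter : List (List Char) → List Char
  | [] => []
  | line :: rest =>
    if PySem.Chars.startswith line notePrefix then bInner rest (line.drop 9 ++ ['\n'])
    else line ++ ['\n'] ++ bOuter rest
def bInner : List (List Char) → List Char → List Char
  | [], _ => []   -- block ran to end of input: no box is emitted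
  | cur :: rest, msg =>
    if cur = ['>'] then bInner rest msg
    else if PySem.Chars.startswith cur notePrefix then bInner rest (msg ++ cur.drop 9 ++ ['\n'])
    else if PySem.Chars.startswith cur quotePrefix then bInner rest (msg ++ cur.drop 2 ++ ['\n'])
    else createInfoBox msg ++ ['\n'] ++ cur ++ ['\n'] ++ bOuter rest
end

def replace_info_boxes_alt (content : String) : String :=
  String.ofList (bOuter (PySem.Chars.splitOn content.toList "\n".toList))

-- ===== PRECONDITION & SPEC =====
def Spec_replace_info_boxes (content : String) (out : String) : Prop := out = replace_info_boxes_alt content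
instance (content : String) (out : String) : Decidable (Spec_replace_info_boxes content out) := by unfold Spec_replace_info_boxes; infer_instance

-- ===== CLAIM (what is proved, stated in full; the proofs are below) =====
def Claim_equal_replace_info_boxes : Prop := ∀ (content : String), Dom_replace_info_boxes content → Spec_replace_info_boxes content (replace_info_boxes content)

-- ===== LEMMAS AND PROOFS =====

-- the loop invariant: A's fold from a collecting / non-collecting state is B's inner / outer scan
theorem loop_eq (lines : List (List Char)) :
    (∀ acc, (lines.foldl aStep (acc, false, [])).1 = acc ++ bOuter lines) ∧
    (∀ acc msg, (lines.foldl aStep (acc, true, msg)).1 = acc ++ bInner lines msg) := by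
  induction lines with
  | nil => simp [bOuter, bInner]
  | cons line rest ih =>
    constructor
    · intro acc
      by_cases h1 : PySem.Chars.startswith line notePrefix
      · simp [aStep, h1, bOuter, ih.2]
      · simp [aStep, h1, bOuter, ih.1]
    · intro acc msg
      by_cases hq : line = ['>']
      · subst hq
        have h1 : PySem.Chars.startswith ['>'] notePrefix = false := by decide
        simp [aStep, h1, bInner, ih.2]
      · by_cases h1 : PySem.Chars.startswith line notePrefix
        · simp [aStep, h1, hq, bInner, ih.2]
        · by_cases h2 : PySem.Chars.startswith line quotePrefix
          · simp [aStep, h1, h2, hq, bInner, ih.2]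
          · simp [aStep, h1, h2, hq, bInner, ih.1]

-- ===== VERDICT (by name: the statement is the Claim_ definition above) =====
theorem replace_info_boxes_spec : Claim_equal_replace_info_boxes := by
  intro content _
  unfold Spec_replace_info_boxes replace_info_boxes replace_info_boxes_alt
  rw [(loop_eq _).1 []]
  simp
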